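-- pv_equiv track=rewrite | github.com/online-ml/river | docs/scripts/index_api.py | parse_params_section
-- ===== SOURCE A (Python) =====
-- import typing
--
-- def parse_params_section(params_doc: str) -> typing.Dict[str, str]:
--     """Parses params documentation and returns a dict with one element per parameter."""
--     descs = {}
--     lines = iter((l[4:] for l in params_doc.splitlines()))
--     content = next(lines)
--     for l in lines:
--         if not l.startswith(' '):
--             try:
--                 name, desc = content.split(':', 1)
--             except ValueError:
--                 name, desc = content, ''
--             descs[name] = ' '.join(desc.split())
--             content = l
--             continue
--         content += l
--     try:
--         name, desc = content.split(':', 1)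
--     except ValueError:
--         name, desc = content, ''
--     descs[name] = ' '.join(desc.split())
--
--     return descs
-- ===== SOURCE B (Python) =====
-- import typing
--
-- def parse_params_section(params_doc: str) -> typing.Dict[str, str]:
--     """Parses params documentation and returns a dict with one element per parameter."""
--     lines = iter(l[4:] for l in params_doc.splitlines())
--     # First pass: group the lines into blocks (a block = a line plus its
--     # indented continuation lines, concatenated without separator).
--     blocks = [next(lines)]
--     for l in lines:
--         if l.startswith(' '):
--             blocks[-1] += l
--         else:
--             blocks.append(l)
--     # Second pass: split each block at its first colon and normalise whitespace.
--     descs = {}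
--     for block in blocks:
--         name, _, desc = block.partition(':')
--         descs[name] = ' '.join(desc.split())
--     return descs
-- ===== Notes on version B (the rewrite author's own statement) =====
-- stated objective: simpler
-- what changed: B separates the work into two passes -- first group lines into continuation blocks, then build the dict from the blocks with str.partition -- instead of A's single loop that interleaves grouping with dict updates and uses try/except ValueError around split.
import Mathlib
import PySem

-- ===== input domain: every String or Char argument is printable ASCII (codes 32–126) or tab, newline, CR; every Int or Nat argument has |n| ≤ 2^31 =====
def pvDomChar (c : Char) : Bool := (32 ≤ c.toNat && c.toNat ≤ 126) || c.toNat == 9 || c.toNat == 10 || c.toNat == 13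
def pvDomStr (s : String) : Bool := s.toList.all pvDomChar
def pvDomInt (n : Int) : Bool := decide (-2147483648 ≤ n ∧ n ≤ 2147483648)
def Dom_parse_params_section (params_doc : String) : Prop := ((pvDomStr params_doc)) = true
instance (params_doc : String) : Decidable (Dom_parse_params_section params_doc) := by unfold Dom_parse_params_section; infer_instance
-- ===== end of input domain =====

-- B restructures A into two passes (group lines into blocks, then build the dict); same return value.

-- ===== PORT A =====
-- descs[name] = ' '.join(desc.split()) after content.split(':', 1) (ValueError → name=content, desc='')
def pvFinishA (descs : PySem.Dict String String) (content : String) : PySem.Dict String String :=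
  match PySem.Str.splitMax? content ":" 1 with
  | some [name, desc] => descs.insert name (PySem.Str.join " " (PySem.Str.split₀ desc))
  | _ => descs.insert content (PySem.Str.join " " (PySem.Str.split₀ ""))

def parse_params_section (params_doc : String) : List (String × String) :=
  match (PySem.Str.splitlines params_doc).map (fun l => PySem.Str.slice l (some 4) none) with
  | [] => []  -- unreachable under Pre_ (Python raises StopIteration here)
  | content :: rest =>
    let st := rest.foldl
      (fun (st : PySem.Dict String String × String) l =>
        if ¬ (PySem.Str.startswith l " ") then (pvFinishA st.1 st.2, l)
        else (st.1, st.2 ++ l))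
      (PySem.Dict.empty, content)
    (pvFinishA st.1 st.2).items

-- ===== PORT B =====
-- block.partition(':') — exact hand port for the nonempty separator ':' via split(':', 1)
def pvPartitionColon (s : String) : String × String :=
  match PySem.Str.splitMax? s ":" 1 with
  | some [name, desc] => (name, desc)
  | _ => (s, "")

def pvAddLine (bs : List String) (l : String) : List String :=
  if PySem.Str.startswith l " " then bs.dropLast ++ [bs.getLastD "" ++ l]
  else bs ++ [l]

def pvFinishB (descs : PySem.Dict String String) (block : String) : PySem.Dict String String :=
  let p := pvPartitionColon block
  descs.insert p.1 (PySem.Str.join " " (PySem.Str.split₀ p.2))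

def parse_params_section_alt (params_doc : String) : List (String × String) :=
  match (PySem.Str.splitlines params_doc).map (fun l => PySem.Str.slice l (some 4) none) with
  | [] => []  -- unreachable under Pre_ (Python raises StopIteration here)
  | first :: rest =>
    let blocks := rest.foldl pvAddLine [first]
    (blocks.foldl pvFinishB PySem.Dict.empty).items

-- ===== PRECONDITION & SPEC =====
-- Pre_ excludes only "" , on which the Python A (and B) raises StopIteration.
def Pre_parse_params_section (params_doc : String) : Prop := params_doc ≠ ""
instance (params_doc : String) : Decidable (Pre_parse_params_section params_doc) := by unfold Pre_parse_params_section; infer_instance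
def pvWitness_parse_params_section : String := "    x : int\n        the x\n    y"
def Spec_parse_params_section (params_doc : String) (out : List (String × String)) : Prop := out = parse_params_section_alt params_doc
instance (params_doc : String) (out : List (String × String)) : Decidable (Spec_parse_params_section params_doc out) := by unfold Spec_parse_params_section; infer_instance

-- ===== CLAIM (what is proved, stated in full; the proofs are below) =====
def Claim_equal_parse_params_section : Prop := ∀ (params_doc : String), Dom_parse_params_section params_doc → Pre_parse_params_section params_doc → Spec_parse_params_section params_doc (parse_params_section params_doc)

-- ===== LEMMAS AND PROOFS =====
lemma pvFinish_eq (d : PySem.Dict String String) (s : String) : pvFinishA d s = pvFinishB d s := by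
  unfold pvFinishA pvFinishB pvPartitionColon
  rcases h : PySem.Str.splitMax? s ":" 1 with _ | ⟨_ | ⟨a, _ | ⟨b, _ | _⟩⟩⟩ <;> simp

lemma pvMain (rest : List String) : ∀ (done : List String) (content : String)
    (d : PySem.Dict String String),
    (rest.foldl pvAddLine (done ++ [content])).foldl pvFinishB d
      = (let st := rest.foldl
            (fun (st : PySem.Dict String String × String) l =>
              if ¬ (PySem.Str.startswith l " ") then (pvFinishA st.1 st.2, l)
              else (st.1, st.2 ++ l))
            (done.foldl pvFinishB d, content)
         pvFinishA st.1 st.2) := by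
  induction rest with
  | nil =>
    intro done content d
    simp [pvFinish_eq]
  | cons l ls ih =>
    intro done content d
    by_cases h : PySem.Str.startswith l " " = true
    · have h' : PySem.Chars.startswith l.toList [' '] = true := by simpa using h
      have hb : pvAddLine (done ++ [content]) l = done ++ [content ++ l] := by
        unfold pvAddLine; rw [if_pos h]; simp
      simp only [List.foldl_cons, hb, ih done (content ++ l) d]
      simp [h']
    · have h' : PySem.Chars.startswith l.toList [' '] = false := by simpa using h
      have hb : pvAddLine (done ++ [content]) l = (done ++ [content]) ++ [l] := by
        unfold pvAddLine; rw [if_neg h]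
      simp only [List.foldl_cons, hb, ih (done ++ [content]) l d]
      simp [h', pvFinish_eq]

-- ===== VERDICT (by name: the statement is the Claim_ definition above) =====
theorem parse_params_section_spec : Claim_equal_parse_params_section := by
  intro params_doc _ _
  unfold Spec_parse_params_section parse_params_section parse_params_section_alt
  rcases (PySem.Str.splitlines params_doc).map (fun l => PySem.Str.slice l (some 4) none) with _ | ⟨first, rest⟩
  · rfl
  · have h2 := congrArg PySem.Dict.items (pvMain rest [] first PySem.Dict.empty)
    simpa using h2.symm
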